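-- pv_equiv track=rewrite | github.com/hamdiranu/cobarepo | Struktur Data/Problem 1/1 - Mengelompokkan Angka.py | mengelompokkanAngka
-- ===== SOURCE A (Python) =====
-- def mengelompokkanAngka(arr) :
--     List_output = [[],[],[]]
--     for i in range(len(arr)) :
--         if arr[i] % 2 == 0 :
--             if arr[i] % 3 == 0 :
--                 List_output[2].append(arr[i])
--             else :
--                 List_output[0].append(arr[i])
--         else :
--             if arr[i] % 3 == 0 :
--                 List_output[2].append(arr[i])
--             else :
--                 List_output[1].append(arr[i])
--     return (List_output)
-- ===== SOURCE B (Python) =====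
-- def mengelompokkanAngka(arr):
--     return [
--         [x for x in arr if x % 2 == 0 and x % 3 != 0],
--         [x for x in arr if x % 2 != 0 and x % 3 != 0],
--         [x for x in arr if x % 3 == 0],
--     ]
-- ===== Notes on version B (the rewrite author's own statement) =====
-- stated objective: idiomatic
-- what changed: Replaces the single nested-branch index loop that appends into mutable buckets with three independent filtered list comprehensions, one per bucket.
import Mathlib
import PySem

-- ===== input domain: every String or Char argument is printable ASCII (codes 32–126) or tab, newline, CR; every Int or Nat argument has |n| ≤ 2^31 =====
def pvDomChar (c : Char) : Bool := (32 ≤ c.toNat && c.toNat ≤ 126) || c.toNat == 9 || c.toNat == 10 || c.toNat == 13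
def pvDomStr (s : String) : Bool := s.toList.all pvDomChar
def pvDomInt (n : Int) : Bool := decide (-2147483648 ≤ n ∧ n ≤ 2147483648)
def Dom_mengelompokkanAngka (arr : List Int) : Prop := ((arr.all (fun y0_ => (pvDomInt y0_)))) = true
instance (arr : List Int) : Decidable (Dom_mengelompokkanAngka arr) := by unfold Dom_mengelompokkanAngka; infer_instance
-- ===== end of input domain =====

-- ===== PORT A =====
-- A: index loop over range(len(arr)) dispatching each element into one of three buckets.
def pvStepA (s : List Int × List Int × List Int) (x : Int) : List Int × List Int × List Int :=
  if PySem.Int.mod x 2 = 0 then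
    if PySem.Int.mod x 3 = 0 then (s.1, s.2.1, s.2.2 ++ [x])
    else (s.1 ++ [x], s.2.1, s.2.2)
  else
    if PySem.Int.mod x 3 = 0 then (s.1, s.2.1, s.2.2 ++ [x])
    else (s.1, s.2.1 ++ [x], s.2.2)

def mengelompokkanAngka (arr : List Int) : List (List Int) :=
  let st := (PySem.List.pyRange 0 arr.length 1).foldl
    (fun s i => pvStepA s (PySem.List.pyGetD arr i 0)) ([], [], [])
  [st.1, st.2.1, st.2.2]

-- ===== PORT B =====
-- B: three independent filtered scans, one per bucket (idiomatic comprehensions).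
def mengelompokkanAngka_alt (arr : List Int) : List (List Int) :=
  [ arr.filter (fun x => decide (PySem.Int.mod x 2 = 0) && !decide (PySem.Int.mod x 3 = 0)),
    arr.filter (fun x => !decide (PySem.Int.mod x 2 = 0) && !decide (PySem.Int.mod x 3 = 0)),
    arr.filter (fun x => decide (PySem.Int.mod x 3 = 0)) ]

-- ===== PRECONDITION & SPEC =====
def Spec_mengelompokkanAngka (arr : List Int) (out : List (List Int)) : Prop := out = mengelompokkanAngka_alt arr
instance (arr : List Int) (out : List (List Int)) : Decidable (Spec_mengelompokkanAngka arr out) := by unfold Spec_mengelompokkanAngka; infer_instance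

-- ===== CLAIM (what is proved, stated in full; the proofs are below) =====
def Claim_equal_mengelompokkanAngka : Prop := ∀ (arr : List Int), Dom_mengelompokkanAngka arr → Spec_mengelompokkanAngka arr (mengelompokkanAngka arr)

-- ===== LEMMAS AND PROOFS =====

-- Invariant: folding pvStepA over any list appends the three filters to the accumulator.
theorem pvStepA_foldl (arr : List Int) (a b c : List Int) :
    arr.foldl pvStepA (a, b, c) =
      (a ++ arr.filter (fun x => decide (PySem.Int.mod x 2 = 0) && !decide (PySem.Int.mod x 3 = 0)),
       b ++ arr.filter (fun x => !decide (PySem.Int.mod x 2 = 0) && !decide (PySem.Int.mod x 3 = 0)),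
       c ++ arr.filter (fun x => decide (PySem.Int.mod x 3 = 0))) := by
  induction arr generalizing a b c with
  | nil => simp
  | cons x xs ih =>
    by_cases h2 : (2 : Int) ∣ x <;> by_cases h3 : (3 : Int) ∣ x <;>
      simp [List.filter_cons, pvStepA, PySem.Int.mod_eq_zero_iff_dvd, h2, h3, ih]

-- ===== VERDICT (by name: the statement is the Claim_ definition above) =====
theorem mengelompokkanAngka_spec : Claim_equal_mengelompokkanAngka := by
  intro arr _
  unfold Spec_mengelompokkanAngka mengelompokkanAngka mengelompokkanAngka_alt
  rw [show ((arr.length : Int)) = PySem.List.len arr from rfl,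
      PySem.List.foldl_pyRange_zero_pyGetD arr 0 pvStepA ([], [], []),
      pvStepA_foldl]
  simp
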